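-- pv_equiv track=rewrite | github.com/martintosney/aoc-2023 | day09/main_part2.py | build_ext_pyramid
-- ===== SOURCE A (Python) =====
-- def build_ext_pyramid(number_list):
--     if len([d for d in number_list if d != 0]) == 0:
--         return [[0] + number_list]
--     else:
--         next_list = [r - l for l, r in zip(number_list[:-1], number_list[1:])]
--         sub_lists = build_ext_pyramid(next_list)
--         previous_value = number_list[0] - sub_lists[0][0]
--         return [[previous_value] + number_list] + sub_lists
-- ===== SOURCE B (Python) =====
-- def build_ext_pyramid(number_list):
--     # Iterative: build all difference levels first, then extend bottom-up.
--     levels = [number_list]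
--     cur = number_list
--     while any(d != 0 for d in cur):
--         cur = [r - l for l, r in zip(cur, cur[1:])]
--         levels.append(cur)
--     results = []
--     below_first = None
--     for level in reversed(levels):
--         first = 0 if below_first is None else level[0] - below_first
--         results.append([first] + level)
--         below_first = first
--     results.reverse()
--     return results
-- ===== Notes on version B (the rewrite author's own statement) =====
-- stated objective: alternative
-- what changed: Replaces A's single recursive pass (which interleaves building each difference level with backward extrapolation on the way out) by an explicit two-phase iteration: first a loop builds the whole list of difference levels, then a bottom-up fold over the reversed levels prepends the extrapolated value to each level.
import Mathlib
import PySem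

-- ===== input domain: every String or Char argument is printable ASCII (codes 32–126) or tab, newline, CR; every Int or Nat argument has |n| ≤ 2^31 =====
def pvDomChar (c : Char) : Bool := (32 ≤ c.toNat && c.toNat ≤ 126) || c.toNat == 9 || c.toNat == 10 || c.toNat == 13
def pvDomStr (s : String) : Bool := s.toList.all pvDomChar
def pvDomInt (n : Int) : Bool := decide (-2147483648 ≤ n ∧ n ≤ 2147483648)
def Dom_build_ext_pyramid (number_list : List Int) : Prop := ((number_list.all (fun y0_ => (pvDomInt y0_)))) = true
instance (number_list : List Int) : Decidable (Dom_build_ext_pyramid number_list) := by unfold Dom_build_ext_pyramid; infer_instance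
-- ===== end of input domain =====

-- B replaces A's single recursive pass by an explicit two-phase iteration (build all
-- difference levels, then extend them bottom-up); same cost, different decomposition.

-- ===== PORT A =====
-- termination helper for A's recursion: the zipped difference list is strictly shorter
lemma pv_nextA_lt (xs : List Int) (h : xs ≠ []) :
    (((PySem.List.slice xs none (some (-1))).zip (PySem.List.slice xs (some 1) none)).map
      (fun p : Int × Int => p.2 - p.1)).length < xs.length := by
  rw [PySem.List.slice_to_neg_one, PySem.List.slice_from_one]
  cases xs with
  | nil => exact absurd rfl h
  | cons a t => simp [List.length_zip]

def build_ext_pyramid (number_list : List Int) : List (List Int) :=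
  if (number_list.filter (fun d => d ≠ 0)).length = 0 then
    [0 :: number_list]
  else
    -- next_list = [r - l for l, r in zip(number_list[:-1], number_list[1:])]
    let next_list := ((PySem.List.slice number_list none (some (-1))).zip
        (PySem.List.slice number_list (some 1) none)).map (fun p => p.2 - p.1)
    let sub_lists := build_ext_pyramid next_list
    -- number_list[0] and sub_lists[0][0]: both lists are nonempty in this branch
    let previous_value := number_list.headD 0 - (sub_lists.headD []).headD 0
    (previous_value :: number_list) :: sub_lists
termination_by number_list.length
decreasing_by
  rename_i hgd
  exact pv_nextA_lt number_list (by rintro rfl; exact hgd rfl)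

-- ===== PORT B =====
-- termination helper for the level-building loop
lemma pv_diffs_lt (xs : List Int) (h : xs ≠ []) :
    ((xs.zip xs.tail).map (fun p : Int × Int => p.2 - p.1)).length < xs.length := by
  cases xs with
  | nil => exact absurd rfl h
  | cons a t => simp [List.length_zip]

-- the while-loop of Source B: collect number_list and all its difference levels
def pvLevels (xs : List Int) : List (List Int) :=
  if xs.any (fun d => d ≠ 0) then
    xs :: pvLevels ((xs.zip xs.tail).map (fun p => p.2 - p.1))
  else
    [xs]
termination_by xs.length
decreasing_by
  rename_i hgd
  exact pv_diffs_lt xs (by rintro rfl; simp at hgd)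

-- one iteration of the 'for level in reversed(levels)' loop of Source B
def pvStep (acc : List (List Int) × Option Int) (level : List Int) :
    List (List Int) × Option Int :=
  let first := match acc.2 with
    | none => 0
    | some b => level.headD 0 - b   -- level[0]: level is nonempty whenever this branch runs
  (acc.1 ++ [first :: level], some first)

def build_ext_pyramid_alt (number_list : List Int) : List (List Int) :=
  (((pvLevels number_list).reverse.foldl pvStep ([], none)).1).reverse

-- ===== PRECONDITION & SPEC =====
def Spec_build_ext_pyramid (number_list : List Int) (out : List (List Int)) : Prop := out = build_ext_pyramid_alt number_list
instance (number_list : List Int) (out : List (List Int)) : Decidable (Spec_build_ext_pyramid number_list out) := by unfold Spec_build_ext_pyramid; infer_instance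

-- ===== CLAIM (what is proved, stated in full; the proofs are below) =====
def Claim_equal_build_ext_pyramid : Prop := ∀ (number_list : List Int), Dom_build_ext_pyramid number_list → Spec_build_ext_pyramid number_list (build_ext_pyramid number_list)

-- ===== LEMMAS AND PROOFS =====

-- zipping the initial segment with the tail truncates the same way as zipping the whole list
lemma pv_zip_dropLast_aux : ∀ (t : List Int) (a : Int), ((a :: t).dropLast).zip t = (a :: t).zip t := by
  intro t
  induction t with
  | nil => intro a; simp
  | cons b t' ih => intro a; simpa using ih b

lemma pv_zip_dropLast (xs : List Int) : xs.dropLast.zip xs.tail = xs.zip xs.tail := by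
  cases xs with
  | nil => rfl
  | cons a t => exact pv_zip_dropLast_aux t a

-- A's zipped-slices difference list equals B's zip with the tail
lemma pv_next_eq (xs : List Int) :
    ((PySem.List.slice xs none (some (-1))).zip (PySem.List.slice xs (some 1) none)).map
      (fun p : Int × Int => p.2 - p.1)
    = (xs.zip xs.tail).map (fun p : Int × Int => p.2 - p.1) := by
  rw [PySem.List.slice_to_neg_one, PySem.List.slice_from_one]
  congr 1
  exact pv_zip_dropLast xs

-- the zero-test of A and the loop guard of B agree
lemma pv_guard (xs : List Int) :
    ((xs.filter (fun d => decide (d ≠ 0))).length = 0) ↔ (xs.any (fun d => decide (d ≠ 0)) = false) := by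
  simp [List.length_eq_zero_iff, List.filter_eq_nil_iff]

-- invariant of B's bottom-up fold: after folding the reversed levels of xs, the
-- accumulator holds A's rows bottom-first together with A's top extrapolated value
lemma pv_fold_levels (n : Nat) (xs : List Int) (h : xs.length ≤ n) :
    (pvLevels xs).reverse.foldl pvStep ([], none)
      = ((build_ext_pyramid xs).reverse,
         some (((build_ext_pyramid xs).headD []).headD 0)) := by
  induction n generalizing xs with
  | zero =>
    have hx : xs = [] := by cases xs <;> simp_all
    subst hx
    rw [pvLevels, if_neg (by simp), build_ext_pyramid, if_pos (by simp)]
    simp [pvStep]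
  | succ n ih =>
    by_cases hA : xs.any (fun d => d ≠ 0) = true
    · have hxne : xs ≠ [] := by rintro rfl; simp at hA
      rw [pvLevels, if_pos hA, build_ext_pyramid,
          if_neg (by intro h0; rw [pv_guard] at h0; rw [h0] at hA; exact Bool.false_ne_true hA)]
      rw [pv_next_eq]
      have hlt := pv_diffs_lt xs hxne
      have hfold := ih ((xs.zip xs.tail).map (fun p => p.2 - p.1)) (by omega)
      simp only [List.reverse_cons, List.foldl_append, hfold]
      simp [pvStep]
    · rw [pvLevels, if_neg hA, build_ext_pyramid, if_pos (by rw [pv_guard]; simpa using hA)]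
      simp [pvStep]

-- ===== VERDICT (by name: the statement is the Claim_ definition above) =====
theorem build_ext_pyramid_spec : Claim_equal_build_ext_pyramid := by
  intro xs _
  unfold Spec_build_ext_pyramid build_ext_pyramid_alt
  rw [pv_fold_levels xs.length xs le_rfl]
  simp
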